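-- pv_equiv track=rewrite | github.com/ASSERT-KTH/Mokav | experiments/c4b/AADTI/iteration-10-sample-10-temp-1/generated_tests/888/7948/temp_acc_qb.py | patched_func
-- ===== SOURCE A (Python) =====
-- def patched_func(*args):
-- 	global_list = []
--
-- 	a = int(args[0])
-- 	b = int(args[1])
-- 	c = int(args[2])
-- 	count = 0
-- 	while ((a > 0) and (b > 0) and (c > 0)):
-- 	    a -= 1
-- 	    b -= 2
-- 	    c -= 4
-- 	    if ((a >= 0) and (b >= 0) and (c >= 0)):
-- 	        count += 7
-- 	global_list.append(count)
-- 	return global_list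
-- ===== SOURCE B (Python) =====
-- def patched_func(*args):
--     a = int(args[0])
--     b = int(args[1])
--     c = int(args[2])
--     if a > 0 and b > 0 and c > 0:
--         return [7 * min(a, b // 2, c // 4)]
--     return [0]
-- ===== Notes on version B (the rewrite author's own statement) =====
-- stated objective: faster
-- what changed: Replaced the decrement loop with a closed form: the count is 7*min(a, b//2, c//4) when all three are positive, else 0.
import Mathlib
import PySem

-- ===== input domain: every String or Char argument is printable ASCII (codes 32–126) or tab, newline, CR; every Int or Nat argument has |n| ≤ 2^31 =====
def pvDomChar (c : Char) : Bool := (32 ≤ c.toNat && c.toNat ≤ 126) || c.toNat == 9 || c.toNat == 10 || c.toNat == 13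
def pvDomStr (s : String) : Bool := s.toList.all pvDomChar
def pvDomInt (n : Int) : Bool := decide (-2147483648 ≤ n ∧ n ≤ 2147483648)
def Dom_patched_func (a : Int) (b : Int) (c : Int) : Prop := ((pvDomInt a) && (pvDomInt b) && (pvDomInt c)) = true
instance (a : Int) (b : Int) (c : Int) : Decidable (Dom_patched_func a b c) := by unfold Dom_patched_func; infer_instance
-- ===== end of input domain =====

-- B replaces A's decrement loop by a closed form (count = 7*min(a, b//2, c//4) when a,b,c > 0, else 0): faster.

-- ===== PORT A =====
-- the while loop of A: state (a, b, c, count); terminates because a strictly decreases while a > 0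
def patched_funcLoop (a : Int) (b : Int) (c : Int) (count : Int) : Int :=
  if a > 0 ∧ b > 0 ∧ c > 0 then
    patched_funcLoop (a - 1) (b - 2) (c - 4)
      (if a - 1 ≥ 0 ∧ b - 2 ≥ 0 ∧ c - 4 ≥ 0 then count + 7 else count)
  else count
termination_by a.toNat
decreasing_by omega

def patched_func (a : Int) (b : Int) (c : Int) : List Int :=
  [patched_funcLoop a b c 0]

-- ===== PORT B =====
def patched_func_alt (a : Int) (b : Int) (c : Int) : List Int :=
  if a > 0 ∧ b > 0 ∧ c > 0 then
    [7 * min a (min (PySem.Int.floordiv b 2) (PySem.Int.floordiv c 4))]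
  else [0]

-- ===== PRECONDITION & SPEC =====
def Spec_patched_func (a : Int) (b : Int) (c : Int) (out : List Int) : Prop := out = patched_func_alt a b c
instance (a : Int) (b : Int) (c : Int) (out : List Int) : Decidable (Spec_patched_func a b c out) := by unfold Spec_patched_func; infer_instance

-- ===== CLAIM (what is proved, stated in full; the proofs are below) =====
def Claim_equal_patched_func : Prop := ∀ (a : Int) (b : Int) (c : Int), Dom_patched_func a b c → Spec_patched_func a b c (patched_func a b c)

-- ===== LEMMAS AND PROOFS =====

-- ===== VERDICT (by name: the statement is the Claim_ definition above) =====
-- closed form for the loop, by induction on the fuel a.toNat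
theorem patched_funcLoop_closed (a b c count : Int) :
    patched_funcLoop a b c count =
      count + 7 * max 0 (min a (min (b / 2) (c / 4))) := by
  rw [patched_funcLoop]
  split_ifs with h h2
  · rw [patched_funcLoop_closed (a - 1) (b - 2) (c - 4)]
    omega
  · rw [patched_funcLoop_closed (a - 1) (b - 2) (c - 4)]
    omega
  · omega
termination_by a.toNat
decreasing_by all_goals omega

theorem patched_func_spec : Claim_equal_patched_func := by
  intro a b c _
  unfold Spec_patched_func patched_func patched_func_alt
  rw [patched_funcLoop_closed,
    PySem.Int.floordiv_eq_ediv_of_pos (a := b) (by omega : (0:Int) < 2),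
    PySem.Int.floordiv_eq_ediv_of_pos (a := c) (by omega : (0:Int) < 4)]
  split_ifs with h
  · simp only [List.cons.injEq, and_true]
    omega
  · simp only [List.cons.injEq, and_true]
    omega
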